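-- pv_equiv track=rewrite | github.com/annacormio/Shortest_Common_Superstring_Exhaustive | main.py | buildSeq
-- ===== SOURCE A (Python) =====
-- def overlap_or_merge(s1, s2): #if 2 seq overlap they are joined with the overlap otherwise they are simply merged
--     over = ''
--     for i in range(min(len(s1),len(s2)) + 1):
--         if s1[-i:] != s2[:i]:  # if the suffix of s2 is not the same as the prefix of s1
--             pass  # go on looking
--         else:  # when subsequence coincide --> overlapping sequence
--             over = s2[:i]  # the i-th subsequence is assigned as an overlap
--     if over!='': #overlap sequence exist
--         l=len(over)
--         seq=s1[:-l]+over+s2[l:] #joimed overlapped sequence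
--     else: #if no overlap exist
--         seq=s1+s2 #just merge the 2 sequences
--     return seq
--
-- def buildSeq(p): #given a permutation it reconstruct the sequence
--     c=p.copy()
--     if len(p)==1: #base case: only one seq left in the list --> seq obtained from that permutation joinings
--         return p[0]
--     else:
--         s=overlap_or_merge(p[0],p[1]) #overlap or merge the first 2 sequences in the list
--         c[0]=s #the obtaied seq is replaced in first position
--         c.remove(p[1]) #second seq is removed
--         return buildSeq(c) #recursive call
-- ===== SOURCE B (Python) =====
-- def _overlap_merge(s1, s2):
--     # largest overlap k corresponds to the smallest position pos = len(s1)-k at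
--     # which the suffix s1[pos:] is a prefix of s2; candidate positions are found
--     # by scanning for s2's first character with str.find.
--     if s2:
--         pos = s1.find(s2[0], max(len(s1) - len(s2), 0))
--         while pos != -1:
--             if s2.startswith(s1[pos:]):
--                 return s1[:pos] + s2
--             pos = s1.find(s2[0], pos + 1)
--     return s1 + s2
--
-- def buildSeq(p):
--     acc = p[0]
--     for s in p[1:]:
--         acc = _overlap_merge(acc, s)
--     return acc
-- ===== Notes on version B (the rewrite author's own statement) =====
-- stated objective: faster
-- what changed: replaces A's recursive list surgery (copy, set, remove, recurse) and its exhaustive ascending scan comparing every suffix/prefix slice pair with a left fold whose merge probes only candidate overlap positions located by str.find on the next string's first character, testing each with startswith and returning at the first (i.e. longest) hit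
import Mathlib
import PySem

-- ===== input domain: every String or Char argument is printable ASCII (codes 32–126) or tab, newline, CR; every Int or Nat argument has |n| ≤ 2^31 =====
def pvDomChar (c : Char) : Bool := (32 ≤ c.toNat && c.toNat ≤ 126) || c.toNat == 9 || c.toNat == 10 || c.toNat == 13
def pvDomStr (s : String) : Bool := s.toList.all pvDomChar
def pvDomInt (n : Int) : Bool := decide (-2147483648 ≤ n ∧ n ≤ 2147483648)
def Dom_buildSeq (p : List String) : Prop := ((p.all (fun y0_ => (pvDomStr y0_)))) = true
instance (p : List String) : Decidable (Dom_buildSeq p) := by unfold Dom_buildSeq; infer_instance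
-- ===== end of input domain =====

-- B replaces A's recursive list surgery and exhaustive ascending overlap scan by a left fold whose
-- merge probes only candidate overlap positions found with str.find (objective: faster, measured).

-- ===== PORT A =====
-- loop body of overlap_or_merge: "if s1[-i:] != s2[:i]: pass else: over = s2[:i]"
def overStep (s1 s2 : String) (ov : String) (i : Int) : String :=
  if PySem.Str.slice s1 (some (-i)) none ≠ PySem.Str.slice s2 none (some i) then ov
  else PySem.Str.slice s2 none (some i)

def overlapOrMerge (s1 s2 : String) : String :=
  let ov := (PySem.List.pyRange 0 (min (PySem.Str.len s1) (PySem.Str.len s2) + 1) 1).foldl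
    (overStep s1 s2) ""
  if ov ≠ "" then
    -- l = len(ov); seq = s1[:-l] + ov + s2[l:]
    PySem.Str.slice s1 none (some (-(PySem.Str.len ov))) ++ ov ++
      PySem.Str.slice s2 (some (PySem.Str.len ov)) none
  else s1 ++ s2

-- cited by buildSeq's decreasing_by: "c = p.copy(); c[0] = s; c.remove(p[1])" yields s :: rest
theorem remove_set_head (s p0 p1 : String) (rest : List String) :
    PySem.List.remove? (PySem.List.pySetD (p0 :: p1 :: rest) 0 s) p1 = some (s :: rest) := by
  have h0 : PySem.List.pySetD (p0 :: p1 :: rest) 0 s = s :: p1 :: rest := by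
    simpa using PySem.List.pySetD_natCast (p0 :: p1 :: rest) 0 s
  rw [h0]
  by_cases h : s = p1
  · subst h; rw [PySem.List.remove?_cons_self]
  · rw [PySem.List.remove?_cons_of_ne _ h, PySem.List.remove?_cons_self]; rfl

def buildSeq : List String → String
  | [] => ""          -- here len(p) != 1 and p[0] raises IndexError: excluded by Pre_buildSeq
  | [x] => x          -- base case: len(p) == 1
  | p0 :: p1 :: rest =>
    -- s = overlap_or_merge(p[0], p[1]); c = p.copy(); c[0] = s; c.remove(p[1]); buildSeq(c)
    match h : PySem.List.remove? (PySem.List.pySetD (p0 :: p1 :: rest) 0 (overlapOrMerge p0 p1)) p1 with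
    | some c => buildSeq c
    | none => ""      -- unreachable: p[1] is in c
termination_by p => p.length
decreasing_by
  rw [remove_set_head] at h
  injection h with h
  subst h
  simp only [List.length_cons]
  omega

-- ===== PORT B =====
-- the while loop of _overlap_merge; fuel only makes the recursion structural (it never runs out)
def altLoop (s1 s2 cs : String) : Int → Nat → String
  | _, 0 => s1 ++ s2
  | pos, fuel + 1 =>
    if pos = -1 then s1 ++ s2
    else if PySem.Str.startswith s2 (PySem.Str.slice s1 (some pos) none) then
      PySem.Str.slice s1 none (some pos) ++ s2
    else altLoop s1 s2 cs (PySem.Str.findFrom s1 cs (pos + 1) none) fuel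

def overlapMergeAlt (s1 s2 : String) : String :=
  match PySem.Str.pyGet? s2 0 with
  | none => s1 ++ s2      -- s2 == ""
  | some c =>
    altLoop s1 s2 (String.ofList [c])
      (PySem.Str.findFrom s1 (String.ofList [c]) (max (PySem.Str.len s1 - PySem.Str.len s2) 0) none)
      (s1.toList.length + 1)

def buildSeq_alt : List String → String
  | [] => ""              -- p[0] raises IndexError: excluded by Pre_buildSeq
  | x :: rest => rest.foldl overlapMergeAlt x

-- ===== PRECONDITION & SPEC =====
-- Pre_ excludes only the empty list, on which both A and B raise IndexError (p[0]).
def Pre_buildSeq (p : List String) : Prop := p ≠ []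
instance (p : List String) : Decidable (Pre_buildSeq p) := by unfold Pre_buildSeq; infer_instance
def pvWitness_buildSeq : List String := ["ba", "ab"]
def Spec_buildSeq (p : List String) (out : String) : Prop := out = buildSeq_alt p
instance (p : List String) (out : String) : Decidable (Spec_buildSeq p out) := by
  unfold Spec_buildSeq; infer_instance

-- ===== CLAIM (what is proved, stated in full; the proofs are below) =====
def Claim_equal_buildSeq : Prop :=
  ∀ (p : List String), Dom_buildSeq p → Pre_buildSeq p → Spec_buildSeq p (buildSeq p)

-- ===== LEMMAS AND PROOFS =====

-- largest k ≤ j with: the length-k suffix of l1 equals the length-k prefix of l2 (0 if none)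
def bestK (l1 l2 : List Char) : Nat → Nat
  | 0 => 0
  | k + 1 => if l1.drop (l1.length - (k + 1)) = l2.take (k + 1) then k + 1 else bestK l1 l2 k

-- first position ≥ p at which the remaining suffix of l1 is a prefix of l2
def firstGood (l1 l2 : List Char) (p : Nat) : Option Nat :=
  (List.range' p (l1.length - p)).find? (fun pos => decide (l1.drop pos <+: l2))

theorem bestK_succ (l1 l2 : List Char) (k : Nat) :
    bestK l1 l2 (k + 1)
      = if l1.drop (l1.length - (k + 1)) = l2.take (k + 1) then k + 1 else bestK l1 l2 k := rfl

theorem bestK_le (l1 l2 : List Char) : ∀ j, bestK l1 l2 j ≤ j := by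
  intro j
  induction j with
  | zero => exact Nat.le_refl _
  | succ j ih =>
    rw [bestK_succ]
    split
    · exact Nat.le_refl _
    · exact Nat.le_trans ih (Nat.le_succ j)

theorem overCond_iff (s1 s2 : String) (k : Nat) (hk : 0 < k) :
    (PySem.Str.slice s1 (some (-(k : Int))) none = PySem.Str.slice s2 none (some (k : Int)))
      ↔ s1.toList.drop (s1.toList.length - k) = s2.toList.take k := by
  rw [← String.toList_inj, PySem.Str.toList_slice, PySem.Str.toList_slice,
      PySem.Chars.slice_eq_listSlice, PySem.Chars.slice_eq_listSlice,
      PySem.List.slice_from_neg_natCast _ _ hk, PySem.List.slice_to_natCast]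

theorem afold (s1 s2 : String) : ∀ j : Nat,
    (((List.range (j + 1)).map (fun k : Nat => (k : Int))).foldl (overStep s1 s2) "").toList
      = s2.toList.take (bestK s1.toList s2.toList j) := by
  intro j
  induction j with
  | zero =>
    rw [show List.range 1 = [0] from rfl]
    simp only [List.map_cons, List.map_nil, List.foldl_cons, List.foldl_nil, Nat.cast_zero]
    rw [show bestK s1.toList s2.toList 0 = 0 from rfl]
    unfold overStep
    split
    · rfl
    · rw [PySem.Str.toList_slice, PySem.Chars.slice_eq_listSlice]
      have h0 := PySem.List.slice_to_natCast s2.toList 0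
      push_cast at h0
      rw [h0]
  | succ j ih =>
    rw [List.range_succ, List.map_append, List.foldl_append]
    simp only [List.map_cons, List.map_nil, List.foldl_cons, List.foldl_nil]
    unfold overStep
    rw [bestK_succ]
    by_cases h : s1.toList.drop (s1.toList.length - (j + 1)) = s2.toList.take (j + 1)
    · rw [if_neg (not_not_intro ((overCond_iff s1 s2 (j + 1) (Nat.succ_pos j)).mpr h)),
        if_pos h, PySem.Str.toList_slice, PySem.Chars.slice_eq_listSlice,
        PySem.List.slice_to_natCast]
    · rw [if_pos (fun hc => h ((overCond_iff s1 s2 (j + 1) (Nat.succ_pos j)).mp hc)), if_neg h]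
      exact ih

theorem A_merge (s1 s2 : String) :
    (overlapOrMerge s1 s2).toList
      = s1.toList.take (s1.toList.length
          - bestK s1.toList s2.toList (min s1.toList.length s2.toList.length)) ++ s2.toList := by
  simp only [overlapOrMerge]
  have hrange : PySem.List.pyRange 0 (min (PySem.Str.len s1) (PySem.Str.len s2) + 1) 1
      = (List.range (min s1.toList.length s2.toList.length + 1)).map (fun k : Nat => (k : Int)) := by
    have h := PySem.List.pyRange_zero_natCast (min s1.toList.length s2.toList.length + 1)
    rw [PySem.Str.len_eq, PySem.Str.len_eq]
    push_cast at h ⊢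
    exact h
  rw [hrange]
  set m := min s1.toList.length s2.toList.length with hm
  have hov := afold s1 s2 m
  set ov := ((List.range (m + 1)).map (fun k : Nat => (k : Int))).foldl (overStep s1 s2) "" with hovdef
  set K := bestK s1.toList s2.toList m with hK
  have hKm : K ≤ m := bestK_le _ _ _
  have hKn2 : K ≤ s2.toList.length := le_trans hKm (min_le_right _ _)
  by_cases hK0 : K = 0
  · have hempty : ov = "" := by
      rw [← String.toList_inj, hov, hK0]
      simp
    rw [if_neg (not_not_intro hempty), hK0]
    simp
  · have hKlen : ov.toList.length = K := by
      rw [hov, List.length_take]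
      omega
    have hne : ov ≠ "" := by
      intro hc
      rw [hc] at hKlen
      simp at hKlen
      omega
    rw [if_pos hne]
    have hlen : PySem.Str.len ov = ((K : Nat) : Int) := by
      rw [PySem.Str.len_eq, hKlen]
    rw [hlen]
    simp only [String.toList_append]
    rw [PySem.Str.toList_slice, PySem.Str.toList_slice,
      PySem.Chars.slice_eq_listSlice, PySem.Chars.slice_eq_listSlice,
      PySem.List.slice_to_neg_natCast _ _ (Nat.pos_of_ne_zero hK0),
      PySem.List.slice_from_natCast, hov, List.append_assoc, List.take_append_drop]

theorem good_iff (l1 l2 : List Char) (k : Nat) (hk1 : 1 ≤ k) (hk2 : k ≤ l1.length) :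
    (l1.drop (l1.length - k) <+: l2) ↔ l1.drop (l1.length - k) = l2.take k := by
  rw [List.prefix_iff_eq_take, List.length_drop]
  rw [show l1.length - (l1.length - k) = k from by omega]

theorem connect (l1 l2 : List Char) : ∀ j, j ≤ min l1.length l2.length →
    (firstGood l1 l2 (l1.length - j) = none → bestK l1 l2 j = 0)
    ∧ (∀ pos, firstGood l1 l2 (l1.length - j) = some pos →
        pos ≤ l1.length ∧ bestK l1 l2 j = l1.length - pos) := by
  intro j
  induction j with
  | zero =>
    intro _
    constructor
    · intro _; rfl
    · intro pos h
      unfold firstGood at h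
      rw [Nat.sub_zero, Nat.sub_self] at h
      simp at h
  | succ j ih =>
    intro hj
    have hjn1 : j + 1 ≤ l1.length := le_trans hj (min_le_left _ _)
    have hjn2 : j + 1 ≤ l2.length := le_trans hj (min_le_right _ _)
    unfold firstGood
    rw [show l1.length - (l1.length - (j + 1)) = j + 1 from by omega, List.range'_succ]
    by_cases hg : l1.drop (l1.length - (j + 1)) <+: l2
    · have hpa : (fun pos => decide (l1.drop pos <+: l2)) (l1.length - (j + 1)) = true := by
        simpa using hg
      rw [List.find?_cons_of_pos (p := fun pos => decide (l1.drop pos <+: l2)) hpa]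
      constructor
      · intro h; exact absurd h (by simp)
      · intro pos h
        injection h with h
        subst h
        refine ⟨by omega, ?_⟩
        rw [bestK_succ, if_pos ((good_iff l1 l2 (j + 1) (Nat.le_add_left 1 j) hjn1).mp hg)]
        omega
    · have hpa : ¬ (fun pos => decide (l1.drop pos <+: l2)) (l1.length - (j + 1)) = true := by
        simpa using hg
      rw [List.find?_cons_of_neg (p := fun pos => decide (l1.drop pos <+: l2)) hpa]
      have hstep : l1.length - (j + 1) + 1 = l1.length - j := by omega
      have hbk : bestK l1 l2 (j + 1) = bestK l1 l2 j := by
        rw [bestK_succ,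
          if_neg (fun hc => hg ((good_iff l1 l2 (j + 1) (Nat.le_add_left 1 j) hjn1).mpr hc))]
      rw [hstep, hbk]
      have ih2 := ih (le_trans (Nat.le_succ j) hj)
      unfold firstGood at ih2
      rw [show l1.length - (l1.length - j) = j from by omega] at ih2
      exact ih2

theorem head_of_good (l1 l2 : List Char) (c : Char) (hc : l2[0]? = some c) (i : Nat)
    (hi : i < l1.length) (hg : l1.drop i <+: l2) : [c] <+: l1.drop i := by
  cases hd : l1.drop i with
  | nil =>
    have hlen := List.length_drop (l := l1) (i := i)
    rw [hd] at hlen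
    simp at hlen
    omega
  | cons a u =>
    cases hl2 : l2 with
    | nil => rw [hl2] at hc; simp at hc
    | cons b t =>
      rw [hl2] at hc
      simp at hc
      rw [hd, hl2] at hg
      rw [List.cons_prefix_cons] at hg
      exact ⟨u, by rw [List.singleton_append, hg.1, hc]⟩

theorem loopB (s1 s2 : String) (c : Char) (hc : s2.toList[0]? = some c) :
    ∀ (fuel p : Nat), p ≤ s1.toList.length → s1.toList.length + 1 ≤ fuel + p →
      (altLoop s1 s2 (String.ofList [c])
          (PySem.Str.findFrom s1 (String.ofList [c]) ((p : Nat) : Int) none) fuel).toList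
        = (match firstGood s1.toList s2.toList p with
           | some pos => s1.toList.take pos ++ s2.toList
           | none => s1.toList ++ s2.toList) := by
  intro fuel
  induction fuel with
  | zero => intro p hp hf; exfalso; omega
  | succ fuel ih =>
    intro p hp hf
    have htl : (String.ofList [c]).toList = [c] := by simp
    rw [PySem.Str.findFrom_eq, htl]
    by_cases hr : PySem.Chars.findFrom s1.toList [c] ((p : Nat) : Int) none = -1
    · have hno : ¬ [c] <:+: s1.toList.drop p :=
        (PySem.Chars.findFrom_natCast_eq_neg_one_iff s1.toList [c] p hp).mp hr
      have hfg : firstGood s1.toList s2.toList p = none := by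
        unfold firstGood
        rw [List.find?_eq_none]
        intro pos hpos hgood
        rw [List.mem_range'_1] at hpos
        have hg : s1.toList.drop pos <+: s2.toList := of_decide_eq_true hgood
        have hposlt : pos < s1.toList.length := by omega
        have hpre : [c] <+: s1.toList.drop pos := head_of_good _ _ _ hc pos hposlt hg
        apply hno
        have hsuf : s1.toList.drop pos <:+ s1.toList.drop p := by
          rw [show s1.toList.drop pos = (s1.toList.drop p).drop (pos - p) from by
            rw [List.drop_drop]; congr 1; omega]
          exact List.drop_suffix _ _
        exact hpre.isInfix.trans hsuf.isInfix
      rw [hfg, hr,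
        show altLoop s1 s2 (String.ofList [c]) (-1) (fuel + 1) = s1 ++ s2 from rfl]
      simp
    · have hspec := PySem.Chars.findFrom_natCast_spec s1.toList [c] p hp hr
      obtain ⟨hpr, hpref, hmin⟩ := hspec
      set r := PySem.Chars.findFrom s1.toList [c] ((p : Nat) : Int) none with hrdef
      have hr0 : (0 : Int) ≤ r := le_trans (Int.natCast_nonneg p) hpr
      set q := r.toNat with hq
      have hrq : r = ((q : Nat) : Int) := by omega
      have hqp : p ≤ q := by omega
      have hqlt : q < s1.toList.length := by
        have h1 := hpref.length_le
        rw [List.length_drop] at h1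
        simp only [List.length_cons, List.length_nil] at h1
        omega
      rw [show altLoop s1 s2 (String.ofList [c]) r (fuel + 1)
          = if r = -1 then s1 ++ s2
            else if PySem.Str.startswith s2 (PySem.Str.slice s1 (some r) none) then
              PySem.Str.slice s1 none (some r) ++ s2
            else altLoop s1 s2 (String.ofList [c])
              (PySem.Str.findFrom s1 (String.ofList [c]) (r + 1) none) fuel from rfl]
      rw [if_neg hr]
      have hsw : (PySem.Str.startswith s2 (PySem.Str.slice s1 (some r) none) = true)
          ↔ s1.toList.drop q <+: s2.toList := by
        rw [PySem.Str.startswith_eq, PySem.Chars.startswith_iff, PySem.Str.toList_slice,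
          PySem.Chars.slice_eq_listSlice, hrq, PySem.List.slice_from_natCast]
      by_cases hgood : s1.toList.drop q <+: s2.toList
      · rw [if_pos (hsw.mpr hgood)]
        have hfg : firstGood s1.toList s2.toList p = some q := by
          unfold firstGood
          rw [show s1.toList.length - p = (q - p) + (s1.toList.length - q) from by omega,
            ← List.range'_append, show p + 1 * (q - p) = q from by omega, List.find?_append]
          have hfirst : List.find? (fun pos => decide (s1.toList.drop pos <+: s2.toList))
              (List.range' p (q - p)) = none := by
            rw [List.find?_eq_none]
            intro i hi hgi
            rw [List.mem_range'_1] at hi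
            have hglist : s1.toList.drop i <+: s2.toList := of_decide_eq_true hgi
            exact hmin i (by omega) (by omega)
              (head_of_good _ _ _ hc i (by omega) hglist)
          rw [hfirst, Option.none_or,
            show s1.toList.length - q = (s1.toList.length - q - 1) + 1 from by omega,
            List.range'_succ]
          have hpa : (fun pos => decide (s1.toList.drop pos <+: s2.toList)) q = true := by
            simpa using hgood
          rw [List.find?_cons_of_pos
            (p := fun pos => decide (s1.toList.drop pos <+: s2.toList)) hpa]
        rw [hfg, hrq]
        simp only [String.toList_append]
        rw [PySem.Str.toList_slice, PySem.Chars.slice_eq_listSlice,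
          PySem.List.slice_to_natCast]
      · rw [if_neg (fun hcond => hgood (hsw.mp hcond)),
          show r + 1 = (((q + 1 : Nat)) : Int) from by omega,
          ih (q + 1) (by omega) (by omega)]
        have hskip : firstGood s1.toList s2.toList p = firstGood s1.toList s2.toList (q + 1) := by
          unfold firstGood
          rw [show s1.toList.length - p = (q + 1 - p) + (s1.toList.length - (q + 1)) from by omega,
            ← List.range'_append, show p + 1 * (q + 1 - p) = q + 1 from by omega,
            List.find?_append]
          have hfirst : List.find? (fun pos => decide (s1.toList.drop pos <+: s2.toList))
              (List.range' p (q + 1 - p)) = none := by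
            rw [List.find?_eq_none]
            intro i hi hgi
            rw [List.mem_range'_1] at hi
            have hglist : s1.toList.drop i <+: s2.toList := of_decide_eq_true hgi
            by_cases hiq : i = q
            · exact hgood (hiq ▸ hglist)
            · exact hmin i (by omega) (by omega)
                (head_of_good _ _ _ hc i (by omega) hglist)
          rw [hfirst, Option.none_or]
        rw [hskip]

theorem B_merge (s1 s2 : String) :
    (overlapMergeAlt s1 s2).toList
      = s1.toList.take (s1.toList.length
          - bestK s1.toList s2.toList (min s1.toList.length s2.toList.length)) ++ s2.toList := by
  unfold overlapMergeAlt
  cases h2 : s2.toList with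
  | nil =>
    have hget : PySem.Str.pyGet? s2 0 = none := by
      rw [PySem.Str.pyGet?_eq, PySem.Chars.pyGet?_eq_listPyGet?, h2]
      rfl
    rw [hget]
    simp only [String.toList_append, h2, List.length_nil, Nat.min_zero, List.append_nil]
    rw [show bestK s1.toList [] 0 = 0 from rfl, Nat.sub_zero, List.take_length]
  | cons c t =>
    have hget : PySem.Str.pyGet? s2 0 = some c := by
      rw [PySem.Str.pyGet?_eq, PySem.Chars.pyGet?_eq_listPyGet?, h2]
      exact PySem.List.pyGet?_zero_cons c t
    rw [hget, ← h2]
    have hc0 : s2.toList[0]? = some c := by rw [h2]; rfl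
    have hstart : (max (PySem.Str.len s1 - PySem.Str.len s2) 0)
        = (((s1.toList.length - s2.toList.length : Nat)) : Int) := by
      rw [PySem.Str.len_eq, PySem.Str.len_eq, max_def]
      split_ifs <;> omega
    rw [hstart, loopB s1 s2 c hc0 (s1.toList.length + 1)
      (s1.toList.length - s2.toList.length) (by omega) (by omega)]
    have hmm : s1.toList.length - s2.toList.length
        = s1.toList.length - min s1.toList.length s2.toList.length := by omega
    rw [hmm]
    have hcon := connect s1.toList s2.toList (min s1.toList.length s2.toList.length) (le_refl _)
    cases hfg : firstGood s1.toList s2.toList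
        (s1.toList.length - min s1.toList.length s2.toList.length) with
    | none =>
      rw [hcon.1 hfg]
      simp
    | some pos =>
      obtain ⟨hple, hbk⟩ := hcon.2 pos hfg
      rw [hbk, show s1.toList.length - (s1.toList.length - pos) = pos from by omega]

theorem merge_eq (s1 s2 : String) : overlapOrMerge s1 s2 = overlapMergeAlt s1 s2 := by
  rw [← String.toList_inj, A_merge, B_merge]

theorem buildSeq_cons (p0 p1 : String) (rest : List String) :
    buildSeq (p0 :: p1 :: rest) = buildSeq (overlapOrMerge p0 p1 :: rest) := by
  have h := remove_set_head (overlapOrMerge p0 p1) p0 p1 rest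
  conv_lhs => rw [buildSeq]
  split
  · next c hc =>
    rw [h] at hc
    injection hc with hc
    rw [← hc]
  · next hc =>
    rw [h] at hc
    cases hc

theorem buildSeq_fold : ∀ (rest : List String) (x : String),
    buildSeq (x :: rest) = rest.foldl overlapOrMerge x := by
  intro rest
  induction rest with
  | nil => intro x; simp only [buildSeq, List.foldl_nil]
  | cons y t ih => intro x; rw [buildSeq_cons, ih, List.foldl_cons]

-- ===== VERDICT (by name: the statement is the Claim_ definition above) =====
theorem buildSeq_spec : Claim_equal_buildSeq := by
  intro p _ hpre
  unfold Spec_buildSeq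
  cases p with
  | nil => exact absurd rfl hpre
  | cons x rest =>
    rw [buildSeq_fold]
    have hfn : overlapOrMerge = overlapMergeAlt := funext fun a => funext fun b => merge_eq a b
    rw [hfn]
    rfl
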